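-- pv_equiv track=rewrite | github.com/jonathantsang/CompetitiveProgramming | codeforces/c634/e/e.py | check
-- ===== SOURCE A (Python) =====
-- def check(arr, bitmask):
-- 	chosen = []
-- 	seen = set()
-- 	for i in range(0, len(arr)):
-- 		if bitmask & (1 << i):
-- 			seen.add(arr[i])
-- 			if len(seen) > 2:
-- 				return 0 # not a three block palindrome
-- 			chosen.append(arr[i])
-- 	seen = set()
-- 	changes = 0
-- 	secondchar = None
-- 	x = 0
-- 	y = 0
-- 	i = 0
-- 	while i < len(chosen) and chosen[i] == chosen[0]:
-- 		x += 1
-- 		i += 1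
-- 	if i == len(chosen):
-- 		return len(chosen)
--
-- 	secondchar = chosen[i]
-- 	while i < len(chosen) and chosen[i] == secondchar:
-- 		y += 1
-- 		i += 1
-- 	if i == len(chosen):
-- 		return 0 # not a three block palidrome
--
-- 	if len(chosen) != i + x:
-- 		return 0 # not a three block palindrome
--
-- 	for j in range(i, len(chosen)):
-- 		if chosen[j] != chosen[0]:
-- 			return 0 # not a three block palindrome
--
-- 	return len(chosen)
-- ===== SOURCE B (Python) =====
-- def check(arr, bitmask):
--     chosen = [v for i, v in enumerate(arr) if bitmask & (1 << i)]
--     # run-length-encode chosen into (value, count) runs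
--     runs = []
--     cur = None
--     cnt = 0
--     for v in chosen:
--         if cnt and v == cur:
--             cnt += 1
--         else:
--             if cnt:
--                 runs.append((cur, cnt))
--             cur, cnt = v, 1
--     if cnt:
--         runs.append((cur, cnt))
--     if not runs:
--         return 0
--     if len(runs) == 1:
--         return len(chosen)
--     if len(runs) == 3 and runs[0] == runs[2]:
--         return len(chosen)
--     return 0
-- ===== Notes on version B (the rewrite author's own statement) =====
-- stated objective: simpler
-- what changed: B builds the chosen subsequence, run-length-encodes it into a (value,count) runs table in one pass, and decides by the shape of that table (0 runs, 1 run, or 3 runs with equal outer runs), replacing A's distinct-value set tracking, two index-advancing while loops, length bookkeeping and a final verification scan with early returns.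
import Mathlib
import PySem

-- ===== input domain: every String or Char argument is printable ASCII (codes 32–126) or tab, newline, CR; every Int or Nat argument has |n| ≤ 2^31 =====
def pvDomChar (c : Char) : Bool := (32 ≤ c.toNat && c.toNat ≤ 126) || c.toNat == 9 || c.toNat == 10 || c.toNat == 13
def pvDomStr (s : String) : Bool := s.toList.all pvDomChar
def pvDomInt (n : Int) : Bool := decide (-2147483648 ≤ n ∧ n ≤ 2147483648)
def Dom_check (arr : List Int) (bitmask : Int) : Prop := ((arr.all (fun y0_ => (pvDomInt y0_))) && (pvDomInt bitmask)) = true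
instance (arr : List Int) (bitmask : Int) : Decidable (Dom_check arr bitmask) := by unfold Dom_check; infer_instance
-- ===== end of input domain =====

-- B replaces A's pointer-scanning with a run-length-encoding and a shape check on the runs table (objective: simpler).


-- ===== PORT A =====
-- first for-loop: build `chosen` while tracking the set of distinct values; none = early `return 0`
def checkSelect (bm : Int) : List Int → Nat → List Int → PySem.Set Int → Option (List Int)
  | [], _, chosen, _ => some chosen
  | a :: rest, i, chosen, seen =>
    if PySem.Int.band bm ((1 : Int) <<< (i : Int)) ≠ 0 then
      let seen' := PySem.Set.add seen a
      if 2 < PySem.Set.len seen' then none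
      else checkSelect bm rest (i + 1) (chosen ++ [a]) seen'
    else checkSelect bm rest (i + 1) chosen seen

-- `while i < len(chosen) and chosen[i] == v: i += 1` — returns the number of steps taken
def whileRun (c : List Int) (v : Int) (i : Nat) : Nat :=
  if h : i < c.length ∧ c.getD i 0 = v then whileRun c v (i + 1) + 1 else 0
termination_by c.length - i
decreasing_by omega

-- `for j in range(i, len(chosen)): if chosen[j] != chosen[0]: return 0`
def forAllEq (c : List Int) (a : Int) (i : Nat) : Bool :=
  if _h : i < c.length then
    if c.getD i 0 = a then forAllEq c a (i + 1) else false
  else true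
termination_by c.length - i

-- the part of A after the first loop (variables x, y, i as in the Python)
def checkScan (chosen : List Int) : Int :=
  let x := whileRun chosen (chosen.getD 0 0) 0
  if x = chosen.length then (chosen.length : Int)
  else
    let secondchar := chosen.getD x 0
    let y := whileRun chosen secondchar x
    let i := x + y
    if i = chosen.length then 0
    else if chosen.length ≠ i + x then 0
    else if forAllEq chosen (chosen.getD 0 0) i then (chosen.length : Int)
    else 0

def check (arr : List Int) (bitmask : Int) : Int :=
  match checkSelect bitmask arr 0 [] (PySem.Set.empty : PySem.Set Int) with
  | none => 0
  | some chosen => checkScan chosen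

-- ===== PORT B =====
-- B's run-length-encoding loop over `chosen` (cur is only read when cnt ≠ 0, so Python's None is a dummy 0 here)
def rleLoop : List Int → List (Int × Int) → Int → Int → List (Int × Int)
  | [], runs, cur, cnt => if cnt ≠ 0 then runs ++ [(cur, cnt)] else runs
  | v :: rest, runs, cur, cnt =>
    if cnt ≠ 0 ∧ v = cur then rleLoop rest runs cur (cnt + 1)
    else rleLoop rest (if cnt ≠ 0 then runs ++ [(cur, cnt)] else runs) v 1

def check_alt (arr : List Int) (bitmask : Int) : Int :=
  let chosen := ((PySem.List.enumerate arr).filter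
      (fun p => PySem.Int.band bitmask ((1 : Int) <<< p.1) ≠ 0)).map Prod.snd
  let runs := rleLoop chosen [] 0 0
  if runs = [] then 0
  else if runs.length = 1 then (chosen.length : Int)
  else if runs.length = 3 ∧ runs.getD 0 (0, 0) = runs.getD 2 (0, 0) then (chosen.length : Int)
  else 0

-- ===== PRECONDITION & SPEC =====
def Spec_check (arr : List Int) (bitmask : Int) (out : Int) : Prop := out = check_alt arr bitmask
instance (arr : List Int) (bitmask : Int) (out : Int) : Decidable (Spec_check arr bitmask out) := by unfold Spec_check; infer_instance

-- ===== CLAIM (what is proved, stated in full; the proofs are below) =====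
def Claim_equal_check : Prop := ∀ (arr : List Int) (bitmask : Int), Dom_check arr bitmask → Spec_check arr bitmask (check arr bitmask)

-- ===== LEMMAS AND PROOFS =====

-- the subsequence of arr selected by the set bits of bm, starting at bit index i
def picks (bm : Int) : List Int → Nat → List Int
  | [], _ => []
  | a :: rest, i =>
    if PySem.Int.band bm ((1 : Int) <<< (i : Int)) ≠ 0 then a :: picks bm rest (i + 1)
    else picks bm rest (i + 1)

-- canonical run-length encoding (head-recursive)
def rleC : List Int → List (Int × Int)
  | [] => []
  | a :: t =>
    match rleC t with
    | [] => [(a, 1)]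
    | (b, k) :: rs => if a = b then (b, k + 1) :: rs else (a, 1) :: (b, k) :: rs

-- merge a pending run into the front of an encoding
def rmerge (p : Int × Int) (rs : List (Int × Int)) : List (Int × Int) :=
  match rs with
  | [] => [p]
  | (b, k) :: rest => if p.1 = b then (p.1, p.2 + k) :: rest else p :: rs

-- B's final shape decision on a runs table
def shape (runs : List (Int × Int)) (len : Int) : Int :=
  if runs = [] then 0
  else if runs.length = 1 then len
  else if runs.length = 3 ∧ runs.getD 0 (0, 0) = runs.getD 2 (0, 0) then len
  else 0

theorem whileRun_eq (c : List Int) (v : Int) : ∀ i, whileRun c v i = ((c.drop i).takeWhile (· == v)).length := by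
  have key : ∀ fuel i, c.length - i ≤ fuel → whileRun c v i = ((c.drop i).takeWhile (· == v)).length := by
    intro fuel
    induction fuel with
    | zero =>
      intro i hf
      rw [whileRun]
      have hge : c.length ≤ i := by omega
      rw [List.drop_eq_nil_of_le hge, dif_neg (by omega)]
      simp
    | succ f ih =>
      intro i hf
      rw [whileRun]
      by_cases hi : i < c.length
      · rw [List.drop_eq_getElem_cons hi]
        have hg := List.getD_eq_getElem c 0 hi
        by_cases hv : c.getD i 0 = v
        · rw [hg] at hv
          simp only [List.takeWhile_cons, hv, beq_self_eq_true, if_true, List.length_cons]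
          rw [dif_pos ⟨hi, by rw [hg]; exact hv⟩, ih (i + 1) (by omega)]
        · rw [hg] at hv
          simp only [List.takeWhile_cons, beq_iff_eq, hv, if_false]
          rw [dif_neg (by rw [hg]; tauto)]
          rfl
      · rw [List.drop_eq_nil_of_le (by omega), dif_neg (by omega)]
        simp
  intro i; exact key (c.length - i) i le_rfl

theorem forAllEq_eq (c : List Int) (a : Int) : ∀ i, forAllEq c a i = (c.drop i).all (· == a) := by
  have key : ∀ fuel i, c.length - i ≤ fuel → forAllEq c a i = (c.drop i).all (· == a) := by
    intro fuel
    induction fuel with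
    | zero =>
      intro i hf
      rw [forAllEq]
      have hge : c.length ≤ i := by omega
      rw [List.drop_eq_nil_of_le hge, dif_neg (by omega)]
      simp
    | succ f ih =>
      intro i hf
      rw [forAllEq]
      by_cases hi : i < c.length
      · rw [List.drop_eq_getElem_cons hi, dif_pos hi]
        have hg := List.getD_eq_getElem c 0 hi
        by_cases hv : c.getD i 0 = a
        · rw [if_pos hv, ih (i + 1) (by omega)]
          rw [hg] at hv
          simp [hv]
        · rw [if_neg hv]
          rw [hg] at hv
          symm
          simp only [List.all_cons, beq_iff_eq, Bool.and_eq_false_imp]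
          simp [hv]
      · rw [List.drop_eq_nil_of_le (by omega), dif_neg hi]
        simp
  intro i; exact key (c.length - i) i le_rfl

theorem rleC_cons (a : Int) (t : List Int) : rleC (a :: t) = rmerge (a, 1) (rleC t) := by
  cases h : rleC t with
  | nil => simp [rleC, h, rmerge]
  | cons p rs =>
    obtain ⟨b, k⟩ := p
    by_cases hab : a = b
    · subst hab
      simp [rleC, h, rmerge]
      ring
    · simp [rleC, h, rmerge, hab]

theorem rleC_cons_spec (t : List Int) : ∀ a : Int,
    rleC (a :: t) = (a, ((t.takeWhile (· == a)).length : Int) + 1) :: rleC (t.dropWhile (· == a)) := by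
  induction t with
  | nil => intro a; simp [rleC]
  | cons h t' ih =>
    intro a
    by_cases hah : a = h
    · subst hah
      rw [rleC_cons, ih a]
      simp only [rmerge, List.takeWhile_cons, List.dropWhile_cons, beq_self_eq_true, if_true,
        List.length_cons]
      push_cast
      ring_nf
    · rw [rleC_cons, ih h]
      simp only [rmerge, List.takeWhile_cons, List.dropWhile_cons, beq_iff_eq]
      rw [if_neg hah, if_neg (by simpa using (fun hh => hah hh.symm)), if_neg (by simpa using (fun hh => hah hh.symm))]
      rw [ih h]
      simp

theorem rleC_nil_iff (l : List Int) : rleC l = [] ↔ l = [] := by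
  cases l with
  | nil => simp [rleC]
  | cons a t => simp [rleC_cons_spec]

theorem rleC_single_iff (l : List Int) (v k : Int) :
    rleC l = [(v, k)] ↔ l ≠ [] ∧ (∀ x ∈ l, x = v) ∧ (l.length : Int) = k := by
  cases l with
  | nil => simp [rleC]
  | cons h u =>
    rw [rleC_cons_spec]
    constructor
    · rintro heq
      rw [List.cons_eq_cons] at heq
      obtain ⟨h1, h2⟩ := heq
      have hdw : u.dropWhile (· == h) = [] := by rwa [rleC_nil_iff] at h2
      have hall : ∀ x ∈ u, x = h := by
        have := List.dropWhile_eq_nil_iff.mp hdw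
        intro x hx; simpa using this x hx
      have htw : u.takeWhile (· == h) = u := List.takeWhile_eq_self_iff.mpr (by
        intro x hx; simp [hall x hx])
      have hv : h = v := by
        have := congrArg Prod.fst h1; simpa using this
      subst hv
      refine ⟨by simp, ?_, ?_⟩
      · intro x hx
        rcases List.mem_cons.mp hx with rfl | hx
        · rfl
        · exact hall x hx
      · have := congrArg Prod.snd h1
        simp only at this
        rw [htw] at this
        simp [← this]
    · rintro ⟨-, hall, hlen⟩
      have hv : h = v := hall h List.mem_cons_self
      subst hv
      have htw : u.takeWhile (· == h) = u := List.takeWhile_eq_self_iff.mpr (by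
        intro x hx; simp [hall x (List.mem_cons_of_mem _ hx)])
      have hdw : u.dropWhile (· == h) = [] := List.dropWhile_eq_nil_iff.mpr (by
        intro x hx; simp [hall x (List.mem_cons_of_mem _ hx)])
      rw [htw, hdw]
      simp only [rleC, List.cons.injEq, Prod.mk.injEq, and_true, true_and]
      simp at hlen
      omega

theorem rmerge_step (v cnt : Int) (rest : List Int) :
    rmerge (v, cnt) (rleC (v :: rest)) = rmerge (v, cnt + 1) (rleC rest) := by
  rw [rleC_cons]
  cases h : rleC rest with
  | nil => simp [rmerge]
  | cons p rs =>
    obtain ⟨b, k⟩ := p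
    by_cases hvb : v = b
    · subst hvb
      simp [rmerge]
      ring
    · simp [rmerge, hvb]

theorem rleLoop_eq_merge (l : List Int) : ∀ runs cur cnt, 1 ≤ cnt →
    rleLoop l runs cur cnt = runs ++ rmerge (cur, cnt) (rleC l) := by
  induction l with
  | nil =>
    intro runs cur cnt hc
    simp only [rleLoop, rleC, rmerge]
    rw [if_pos (by omega)]
  | cons v rest ih =>
    intro runs cur cnt hc
    by_cases hvc : v = cur
    · subst hvc
      rw [rleLoop, if_pos ⟨by omega, rfl⟩, ih runs v (cnt + 1) (by omega), rmerge_step]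
    · rw [rleLoop, if_neg (by tauto), if_pos (by omega),
        ih (runs ++ [(cur, cnt)]) v 1 (by omega)]
      rw [rleC_cons, List.append_assoc]
      congr 1
      rw [← rleC_cons, rleC_cons_spec]
      have hcv : ¬ cur = v := fun hh => hvc hh.symm
      simp [rmerge, hcv]

theorem rleLoop_init (l : List Int) : rleLoop l [] 0 0 = rleC l := by
  cases l with
  | nil => simp [rleLoop, rleC]
  | cons v rest =>
    rw [rleLoop, if_neg (by simp), if_neg (by simp), rleLoop_eq_merge rest [] v 1 (by omega),
      rleC_cons]
    simp

theorem mem_map_fst_rleC (l : List Int) (v : Int) (h : v ∈ l) : v ∈ (rleC l).map Prod.fst := by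
  induction l with
  | nil => simp at h
  | cons a t ih =>
    rcases List.mem_cons.mp h with rfl | hv
    · cases hrt : rleC t with
      | nil => simp [rleC, hrt]
      | cons p rs =>
        obtain ⟨b, k⟩ := p
        by_cases hab : v = b
        · subst hab; simp [rleC, hrt]
        · simp [rleC, hrt, hab]
    · have hmem := ih hv
      cases hrt : rleC t with
      | nil => simp [hrt] at hmem
      | cons p rs =>
        obtain ⟨b, k⟩ := p
        rw [hrt] at hmem
        by_cases hab : a = b
        · subst hab; simpa [rleC, hrt] using hmem
        · simp only [rleC, hrt, if_neg hab]
          simp only [List.map_cons, List.mem_cons] at hmem ⊢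
          tauto

theorem nodup_len_le_two (l : List Int) (a b : Int) (hnd : l.Nodup) (hc : ∀ v ∈ l, v = a ∨ v = b) :
    l.length ≤ 2 := by
  rcases l with _ | ⟨x, l⟩
  · simp
  rcases l with _ | ⟨y, l⟩
  · simp
  rcases l with _ | ⟨z, l⟩
  · simp
  exfalso
  have hx := hc x (by simp)
  have hy := hc y (by simp)
  have hz := hc z (by simp)
  simp only [List.nodup_cons, List.mem_cons] at hnd
  rcases hx with rfl | rfl <;> rcases hy with rfl | rfl <;> rcases hz with rfl | rfl <;> tauto

theorem drop_takeWhile_length (p : Int → Bool) (l : List Int) :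
    List.drop (l.takeWhile p).length l = l.dropWhile p := by
  induction l with
  | nil => simp
  | cons h u ih =>
    by_cases hp : p h
    · simp [hp, ih]
    · simp [hp]

theorem getD_eq_headD_drop (l : List Int) : ∀ n, l.getD n 0 = (List.drop n l).headD 0 := by
  induction l with
  | nil => intro n; simp
  | cons h u ih =>
    intro n
    cases n with
    | zero => simp
    | succ m => simp only [List.getD_cons_succ, List.drop_succ_cons]; exact ih m

theorem scan_eq (c : List Int) : checkScan c = shape (rleC c) (c.length : Int) := by
  cases c with
  | nil => simp [checkScan, whileRun_eq, shape, rleC]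
  | cons a t =>
    have h0 : (a :: t).getD 0 0 = a := rfl
    have htw : List.takeWhile (fun x => x == a) (a :: t) = a :: t.takeWhile (fun x => x == a) := by
      simp
    simp only [checkScan, whileRun_eq, forAllEq_eq, h0, List.drop_zero, htw, List.length_cons]
    have hd1 : List.drop ((t.takeWhile (fun x => x == a)).length + 1) (a :: t)
        = t.dropWhile (fun x => x == a) := by
      rw [List.drop_succ_cons]
      exact drop_takeWhile_length _ t
    have hlen1 : t.length = (t.takeWhile (fun x => x == a)).length
        + (t.dropWhile (fun x => x == a)).length := by
      conv_lhs => rw [← List.takeWhile_append_dropWhile (p := fun x => x == a) (l := t)]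
      rw [List.length_append]
    rw [rleC_cons_spec]
    rcases h2 : t.dropWhile (fun x => x == a) with _ | ⟨b, u⟩
    · -- one run: chosen is a single block
      rw [h2] at hlen1
      rw [if_pos (by rw [hlen1]; simp)]
      simp [shape, rleC]
    · -- at least two runs
      rw [h2] at hlen1 hd1
      rw [if_neg (by simp at hlen1 ⊢; omega)]
      have hgd : (a :: t).getD ((t.takeWhile (fun x => x == a)).length + 1) 0 = b := by
        rw [getD_eq_headD_drop, hd1]; rfl
      rw [hgd, hd1]
      have htw2 : List.takeWhile (fun x => x == b) (b :: u) = b :: u.takeWhile (fun x => x == b) := by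
        simp
      rw [htw2, rleC_cons_spec]
      simp only [List.length_cons]
      have hd2 : List.drop ((t.takeWhile (fun x => x == a)).length + 1
            + ((u.takeWhile (fun x => x == b)).length + 1)) (a :: t)
          = u.dropWhile (fun x => x == b) := by
        rw [← List.drop_drop, hd1, List.drop_succ_cons]
        exact drop_takeWhile_length _ u
      have hlen2 : u.length = (u.takeWhile (fun x => x == b)).length
          + (u.dropWhile (fun x => x == b)).length := by
        conv_lhs => rw [← List.takeWhile_append_dropWhile (p := fun x => x == b) (l := u)]
        rw [List.length_append]
      simp only [hd2]
      rcases h3 : u.dropWhile (fun x => x == b) with _ | ⟨w, r⟩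
      · -- exactly two runs
        rw [h3] at hlen2
        rw [if_pos (by simp only [List.length_cons, List.length_nil] at hlen1 hlen2 ⊢; omega)]
        simp [shape, rleC]
      · -- three or more runs
        rw [h3] at hlen2 hd2
        rw [if_neg (by simp only [List.length_cons] at hlen1 hlen2 ⊢; omega)]
        by_cases hc3 : rleC (w :: r) = [(a, ((t.takeWhile (fun x => x == a)).length : Int) + 1)]
        · obtain ⟨-, hall, hlenc⟩ :=
            (rleC_single_iff (w :: r) a ((t.takeWhile (fun x => x == a)).length + 1)).mp hc3
          have hlc : (w :: r).length = (t.takeWhile (fun x => x == a)).length + 1 := by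
            exact_mod_cast hlenc
          rw [if_neg (by simp only [List.length_cons] at hlen1 hlen2 hlc ⊢; omega)]
          rw [if_pos (by simpa using fun v hv => hall v hv)]
          rw [hc3]
          simp [shape]
        · have hns : ¬ ((∀ x ∈ w :: r, x = a) ∧ ((w :: r).length : Int)
              = ((t.takeWhile (fun x => x == a)).length : Int) + 1) := by
            intro ⟨ha, hb⟩
            exact hc3 ((rleC_single_iff _ _ _).mpr ⟨by simp, ha, hb⟩)
          have hshape0 : shape ((a, ((t.takeWhile (fun x => x == a)).length : Int) + 1)
              :: (b, ((u.takeWhile (fun x => x == b)).length : Int) + 1) :: rleC (w :: r))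
              ((t.length + 1 : Nat) : Int) = 0 := by
            have hne : rleC (w :: r) ≠ [] := by
              rw [Ne, rleC_nil_iff]; simp
            simp only [shape, List.length_cons]
            rw [if_neg (by simp), if_neg (by simp)]
            rcases h4 : rleC (w :: r) with _ | ⟨q, qs⟩
            · exact absurd h4 hne
            · rcases qs with _ | ⟨q2, qs2⟩
              · by_cases hq : (a, ((t.takeWhile (fun x => x == a)).length : Int) + 1) = q
                · exact absurd (by rw [h4, ← hq]) hc3
                · rw [if_neg (fun hcond => hq hcond.2)]
              · rw [if_neg (by simp)]
          rw [hshape0]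
          by_cases hL : t.length + 1 = (t.takeWhile (fun x => x == a)).length + 1
              + ((u.takeWhile (fun x => x == b)).length + 1)
              + ((t.takeWhile (fun x => x == a)).length + 1)
          · rw [if_neg (by omega)]

            rw [if_neg (by
              simp only [List.all_cons, List.all_eq_true, beq_iff_eq, Bool.and_eq_true]
              intro hall
              exact hns ⟨fun v hv => by
                  rcases List.mem_cons.mp hv with rfl | hv
                  · exact hall.1
                  · exact hall.2 v hv,
                by simp only [List.length_cons] at hlen1 hlen2 ⊢; push_cast; omega⟩)]
          · rw [if_pos (by omega)]

theorem altChosen_eq (bm : Int) (arr : List Int) : ∀ i : Nat,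
    ((PySem.List.enumerate arr (i : Int)).filter
      (fun p => PySem.Int.band bm ((1 : Int) <<< p.1) ≠ 0)).map Prod.snd = picks bm arr i := by
  induction arr with
  | nil => intro i; simp [PySem.List.enumerate, picks]
  | cons a rest ih =>
    intro i
    rw [PySem.List.enumerate_cons]
    have hcast : ((i : Int) + 1) = ((i + 1 : Nat) : Int) := by push_cast; ring
    rw [hcast, List.filter_cons]
    by_cases hb : PySem.Int.band bm ((1 : Int) <<< (i : Int)) ≠ 0
    · rw [if_pos (by simpa using hb), List.map_cons, ih (i + 1)]
      simp only [picks]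
      rw [if_pos hb]
    · rw [if_neg (by simpa using hb), ih (i + 1)]
      simp only [picks]
      rw [if_neg hb]

theorem check_alt_eq (arr : List Int) (bm : Int) :
    check_alt arr bm = shape (rleC (picks bm arr 0)) ((picks bm arr 0).length : Int) := by
  unfold check_alt
  rw [show ((PySem.List.enumerate arr).filter
      (fun p => PySem.Int.band bm ((1 : Int) <<< p.1) ≠ 0)).map Prod.snd = picks bm arr 0 from
    altChosen_eq bm arr 0]
  simp only [rleLoop_init, shape]

theorem select_spec (arr : List Int) (bm : Int) : ∀ (i : Nat) (chosen seen : List Int),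
    seen.Nodup → seen.length ≤ 2 →
    ((∀ c, checkSelect bm arr i chosen seen = some c →
        c = chosen ++ picks bm arr i ∧ ∃ a b, ∀ v ∈ seen ++ picks bm arr i, v = a ∨ v = b)
     ∧ (checkSelect bm arr i chosen seen = none →
        ¬ ∃ a b, ∀ v ∈ seen ++ picks bm arr i, v = a ∨ v = b)) := by
  induction arr with
  | nil =>
    intro i chosen seen hnd hlen
    constructor
    · intro c hc
      simp only [checkSelect, Option.some.injEq] at hc
      subst hc
      refine ⟨by simp [picks], ?_⟩
      rcases seen with _ | ⟨a, seen'⟩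
      · exact ⟨0, 0, by simp [picks]⟩
      rcases seen' with _ | ⟨b, seen''⟩
      · exact ⟨a, a, by simp [picks]⟩
      rcases seen'' with _ | ⟨c', s3⟩
      · exact ⟨a, b, by intro v hv; simp [picks] at hv; tauto⟩
      · simp at hlen
    · intro hc; simp [checkSelect] at hc
  | cons x rest ih =>
    intro i chosen seen hnd hlen
    by_cases hb : PySem.Int.band bm ((1 : Int) <<< (i : Int)) ≠ 0
    · have hsel : checkSelect bm (x :: rest) i chosen seen
          = if 2 < PySem.Set.len (PySem.Set.add seen x) then none
            else checkSelect bm rest (i + 1) (chosen ++ [x]) (PySem.Set.add seen x) := by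
        simp only [checkSelect, if_pos hb]
      have hpicks : picks bm (x :: rest) i = x :: picks bm rest (i + 1) := by
        simp only [picks, if_pos hb]
      have hnd' : (PySem.Set.add seen x).Nodup := PySem.Set.nodup_add _ _ hnd
      have hmem' : ∀ v : Int, v ∈ PySem.Set.add seen x ↔ v ∈ seen ∨ v = x := by
        intro v; exact (PySem.Set.mem_add (y := v) (s := seen) (x := x))
      by_cases hover : 2 < PySem.Set.len (PySem.Set.add seen x)
      · rw [hsel, if_pos hover]
        constructor
        · intro c hc; exact absurd hc (by simp)
        · rintro - ⟨α, β, hcov⟩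
          have hcov' : ∀ v ∈ PySem.Set.add seen x, v = α ∨ v = β := by
            intro v hv
            rcases (hmem' v).mp hv with hv | rfl
            · exact hcov v (by simp [hv])
            · exact hcov v (by rw [hpicks]; simp)
          have hle := nodup_len_le_two _ α β hnd' hcov'
          have hlen' : PySem.Set.len (PySem.Set.add seen x) = (PySem.Set.add seen x).length := rfl
          omega
      · rw [hsel, if_neg hover]
        have hlen2 : (PySem.Set.add seen x).length ≤ 2 := by
          have hlen' : PySem.Set.len (PySem.Set.add seen x) = (PySem.Set.add seen x).length := rfl
          omega
        obtain ⟨ihs, ihn⟩ := ih (i + 1) (chosen ++ [x]) (PySem.Set.add seen x) hnd' hlen2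
        constructor
        · intro c hc
          obtain ⟨he, α, β, hcov⟩ := ihs c hc
          refine ⟨by rw [hpicks, he, List.append_assoc]; simp, ⟨α, β, ?_⟩⟩
          rw [hpicks]
          intro v hv
          rcases List.mem_append.mp hv with hv | hv
          · exact hcov v (List.mem_append.mpr (Or.inl ((hmem' v).mpr (Or.inl hv))))
          · rcases List.mem_cons.mp hv with rfl | hv
            · exact hcov v (List.mem_append.mpr (Or.inl ((hmem' v).mpr (Or.inr rfl))))
            · exact hcov v (List.mem_append.mpr (Or.inr hv))
        · rintro hc ⟨α, β, hcov⟩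
          refine ihn hc ⟨α, β, ?_⟩
          rw [hpicks] at hcov
          intro v hv
          rcases List.mem_append.mp hv with hv | hv
          · rcases (hmem' v).mp hv with hv | rfl
            · exact hcov v (by simp [hv])
            · exact hcov v (by simp)
          · exact hcov v (by simp [hv])
    · have hsel : checkSelect bm (x :: rest) i chosen seen
          = checkSelect bm rest (i + 1) chosen seen := by
        simp only [checkSelect, if_neg hb]
      have hpicks : picks bm (x :: rest) i = picks bm rest (i + 1) := by
        simp only [picks, if_neg hb]
      rw [hsel, hpicks]
      exact ih (i + 1) chosen seen hnd hlen

-- ===== VERDICT (by name: the statement is the Claim_ definition above) =====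
theorem check_spec : Claim_equal_check := by
  unfold Claim_equal_check
  intro arr bm _
  unfold Spec_check
  rw [check_alt_eq]
  unfold check
  cases h : checkSelect bm arr 0 [] (PySem.Set.empty : PySem.Set Int) with
  | some c =>
    obtain ⟨ihs, -⟩ := select_spec arr bm 0 [] [] (by simp) (by simp)
    obtain ⟨he, -⟩ := ihs c h
    show checkScan c = shape (rleC (picks bm arr 0)) ((picks bm arr 0).length : Int)
    rw [scan_eq, he]
    simp
  | none =>
    obtain ⟨-, ihn⟩ := select_spec arr bm 0 [] [] (by simp) (by simp)
    have hncov := ihn h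
    show (0 : Int) = shape (rleC (picks bm arr 0)) ((picks bm arr 0).length : Int)
    symm
    rcases h4 : rleC (picks bm arr 0) with _ | ⟨⟨q1, k1⟩, qs⟩
    · simp [shape]
    rcases qs with _ | ⟨⟨q2, k2⟩, qs2⟩
    · exfalso
      apply hncov
      refine ⟨q1, q1, ?_⟩
      intro v hv
      have hm := mem_map_fst_rleC (picks bm arr 0) v (by simpa using hv)
      rw [h4] at hm
      simp at hm
      tauto
    rcases qs2 with _ | ⟨⟨q3, k3⟩, qs3⟩
    · simp [shape]
    by_cases hq : qs3 = [] ∧ (q1, k1) = (q3, k3)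
    · exfalso
      apply hncov
      refine ⟨q1, q2, ?_⟩
      intro v hv
      have hm := mem_map_fst_rleC (picks bm arr 0) v (by simpa using hv)
      rw [h4] at hm
      obtain ⟨hq0, hq13⟩ := hq
      subst hq0
      have hq31 : q3 = q1 := by
        have := congrArg Prod.fst hq13; simpa using this.symm
      simp [hq31] at hm
      tauto
    · simp only [shape]
      rw [if_neg (by simp), if_neg (by simp), if_neg (by
        rintro ⟨hl, he⟩
        apply hq
        simp only [List.length_cons] at hl
        have hq0 : qs3 = [] := List.length_eq_zero_iff.mp (by omega)
        subst hq0
        exact ⟨rfl, by simpa [List.getD] using he⟩)]
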